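-- pv_equiv track=rewrite | github.com/whanii/ai-agents | ai-agent-trends/scripts/summarize_items.py | _extract_codex_failure_detail
-- ===== SOURCE A (Python) =====
-- def _extract_codex_failure_detail(returncode: int, stdout_text: str, stderr_text: str) -> str:
--     combined_lines = []
--     for source_text in [stderr_text, stdout_text]:
--         for raw_line in source_text.splitlines():
--             line = " ".join(raw_line.split())
--             if line:
--                 combined_lines.append(line)
--
--     priority_patterns = [
--         "Error:",
--         "thread/start failed",
--         "Failed to create session",
--         "permission denied",
--         "액세스가 거부되었습니다",
--         "Failed to create shell snapshot",
--         "error sending request",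
--     ]
--     for pattern in priority_patterns:
--         for line in combined_lines:
--             if pattern.lower() in line.lower():
--                 return f"Codex CLI failed: {_compact_text(line, 220)}"
--
--     for line in combined_lines:
--         if "WARN" not in line:
--             return f"Codex CLI failed: {_compact_text(line, 220)}"
--
--     return f"Codex CLI failed with exit code {returncode}"
--
-- def _compact_text(text: str, limit: int) -> str:
--     cleaned = " ".join(str(text).split())
--     if len(cleaned) <= limit:
--         return cleaned
--     return cleaned[: limit - 3] + "..."
-- ===== SOURCE B (Python) =====
-- def _compact_text(text: str, limit: int) -> str:
--     cleaned = " ".join(str(text).split())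
--     if len(cleaned) <= limit:
--         return cleaned
--     return cleaned[: limit - 3] + "..."
--
-- _PRIORITY_PATTERNS = [
--     "Error:",
--     "thread/start failed",
--     "Failed to create session",
--     "permission denied",
--     "액세스가 거부되었습니다",
--     "Failed to create shell snapshot",
--     "error sending request",
-- ]
--
-- def _pattern_index(line: str):
--     low = line.lower()
--     for i, pattern in enumerate(_PRIORITY_PATTERNS):
--         if pattern.lower() in low:
--             return i
--     return None
--
-- def _extract_codex_failure_detail(returncode: int, stdout_text: str, stderr_text: str) -> str:
--     combined_lines = [
--         line
--         for raw_line in stderr_text.splitlines() + stdout_text.splitlines()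
--         for line in [" ".join(raw_line.split())]
--         if line
--     ]
--
--     # single pass: keep the line with the smallest matching pattern index,
--     # ties broken by earliest line
--     best = None  # (pattern_index, line)
--     for line in combined_lines:
--         idx = _pattern_index(line)
--         if idx is not None and (best is None or idx < best[0]):
--             best = (idx, line)
--
--     if best is not None:
--         return f"Codex CLI failed: {_compact_text(best[1], 220)}"
--
--     non_warn = next((line for line in combined_lines if "WARN" not in line), None)
--     if non_warn is not None:
--         return f"Codex CLI failed: {_compact_text(non_warn, 220)}"
--
--     return f"Codex CLI failed with exit code {returncode}"
-- ===== Notes on version B (the rewrite author's own statement) =====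
-- stated objective: alternative
-- what changed: The pattern-major nested scan (try each priority pattern against the whole line list, return on first hit) is replaced by a single line-major pass that keeps the line with the smallest matching pattern index (earliest line on ties); the line list is built by map+filter instead of nested append loops.
import Mathlib
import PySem

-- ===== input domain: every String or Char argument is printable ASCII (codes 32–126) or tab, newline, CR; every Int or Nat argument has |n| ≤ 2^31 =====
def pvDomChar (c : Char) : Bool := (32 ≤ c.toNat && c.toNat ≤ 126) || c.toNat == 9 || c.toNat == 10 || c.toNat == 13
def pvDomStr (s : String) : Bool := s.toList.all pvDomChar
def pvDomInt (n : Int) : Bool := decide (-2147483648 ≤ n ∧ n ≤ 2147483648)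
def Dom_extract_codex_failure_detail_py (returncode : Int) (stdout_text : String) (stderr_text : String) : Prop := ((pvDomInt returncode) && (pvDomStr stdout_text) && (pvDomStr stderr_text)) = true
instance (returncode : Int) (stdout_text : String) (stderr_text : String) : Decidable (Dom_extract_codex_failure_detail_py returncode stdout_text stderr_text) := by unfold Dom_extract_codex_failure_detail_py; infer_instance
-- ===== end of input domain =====

-- B replaces A's pattern-major nested scan by a single line-major pass keeping the line with the
-- smallest matching pattern index (alternative decomposition, same cost); return values proved equal.


-- shared module helper _compact_text (identical in Source A and Source B)
def pyCompactText (text : String) (limit : Int) : String :=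
  let cleaned := PySem.Str.join " " (PySem.Str.split₀ text)
  if PySem.Str.len cleaned ≤ limit then cleaned
  else PySem.Str.join "" [PySem.Str.slice cleaned none (some (limit - 3)), "..."]

def pvPriorityPatterns : List String :=
  ["Error:", "thread/start failed", "Failed to create session", "permission denied",
   "액세스가 거부되었습니다", "Failed to create shell snapshot", "error sending request"]

-- ===== PORT A =====
-- 'for pattern: for line: if match: return line' — first pattern with a match, first line matching it
def aPatternLoop (combined_lines : List String) : List String → Option String
  | [] => none
  | pattern :: rest =>
    match combined_lines.find? (fun line => PySem.Str.isIn (PySem.Str.lower pattern) (PySem.Str.lower line)) with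
    | some line => some line
    | none => aPatternLoop combined_lines rest

def extract_codex_failure_detail_py (returncode : Int) (stdout_text : String) (stderr_text : String) : String :=
  let combined_lines : List String :=
    [stderr_text, stdout_text].foldl (fun acc source_text =>
      (PySem.Str.splitlines source_text).foldl (fun acc2 raw_line =>
        let line := PySem.Str.join " " (PySem.Str.split₀ raw_line)
        if line ≠ "" then acc2 ++ [line] else acc2) acc) []
  match aPatternLoop combined_lines pvPriorityPatterns with
  | some line => PySem.Str.join "" ["Codex CLI failed: ", pyCompactText line 220]
  | none =>
    match combined_lines.find? (fun line => !(PySem.Str.isIn "WARN" line)) with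
    | some line => PySem.Str.join "" ["Codex CLI failed: ", pyCompactText line 220]
    | none => PySem.Str.join "" ["Codex CLI failed with exit code ", PySem.Int.toStr returncode]

-- ===== PORT B =====
-- _pattern_index: smallest i with priority_patterns[i].lower() in line.lower()
def bPatternIndexGo (low : String) (i : Nat) : List String → Option Nat
  | [] => none
  | pattern :: rest =>
    if PySem.Str.isIn (PySem.Str.lower pattern) low then some i else bPatternIndexGo low (i + 1) rest

def bPatternIndex (line : String) : Option Nat :=
  bPatternIndexGo (PySem.Str.lower line) 0 pvPriorityPatterns

-- loop body of B's single pass: keep the (index, line) with the smallest index, earliest line on ties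
def bStep (best : Option (Nat × String)) (line : String) : Option (Nat × String) :=
  match bPatternIndex line with
  | none => best
  | some idx =>
    match best with
    | none => some (idx, line)
    | some (j, bline) => if idx < j then some (idx, line) else some (j, bline)

def extract_codex_failure_detail_py_alt (returncode : Int) (stdout_text : String) (stderr_text : String) : String :=
  let combined_lines : List String :=
    ((PySem.Str.splitlines stderr_text ++ PySem.Str.splitlines stdout_text).map
      (fun raw_line => PySem.Str.join " " (PySem.Str.split₀ raw_line))).filter (fun line => line ≠ "")
  match combined_lines.foldl bStep none with
  | some best => PySem.Str.join "" ["Codex CLI failed: ", pyCompactText best.2 220]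
  | none =>
    match combined_lines.find? (fun line => !(PySem.Str.isIn "WARN" line)) with
    | some line => PySem.Str.join "" ["Codex CLI failed: ", pyCompactText line 220]
    | none => PySem.Str.join "" ["Codex CLI failed with exit code ", PySem.Int.toStr returncode]

-- ===== PRECONDITION & SPEC =====
def Spec_extract_codex_failure_detail_py (returncode : Int) (stdout_text : String) (stderr_text : String) (out : String) : Prop := out = extract_codex_failure_detail_py_alt returncode stdout_text stderr_text
instance (returncode : Int) (stdout_text : String) (stderr_text : String) (out : String) : Decidable (Spec_extract_codex_failure_detail_py returncode stdout_text stderr_text out) := by unfold Spec_extract_codex_failure_detail_py; infer_instance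

-- ===== CLAIM (what is proved, stated in full; the proofs are below) =====
def Claim_equal_extract_codex_failure_detail_py : Prop := ∀ (returncode : Int) (stdout_text : String) (stderr_text : String), Dom_extract_codex_failure_detail_py returncode stdout_text stderr_text → Spec_extract_codex_failure_detail_py returncode stdout_text stderr_text (extract_codex_failure_detail_py returncode stdout_text stderr_text)

-- ===== LEMMAS AND PROOFS =====

def pvMatch (pattern line : String) : Bool :=
  PySem.Str.isIn (PySem.Str.lower pattern) (PySem.Str.lower line)

-- smallest index of a pattern of ps contained in line
def pvKey (ps : List String) (line : String) : Option Nat :=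
  match ps with
  | [] => none
  | p :: rest => if pvMatch p line then some 0 else (pvKey rest line).map (· + 1)

def pvStep (ps : List String) (best : Option (Nat × String)) (line : String) : Option (Nat × String) :=
  match pvKey ps line with
  | none => best
  | some idx =>
    match best with
    | none => some (idx, line)
    | some (j, bline) => if idx < j then some (idx, line) else some (j, bline)

lemma bPatternIndexGo_eq (line : String) (ps : List String) (i : Nat) :
    bPatternIndexGo (PySem.Str.lower line) i ps = (pvKey ps line).map (i + ·) := by
  induction ps generalizing i with
  | nil => simp [bPatternIndexGo, pvKey]
  | cons p rest ih =>
    by_cases h : pvMatch p line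
    · simp [bPatternIndexGo, pvKey, pvMatch] at h ⊢; simp [h]
    · simp only [bPatternIndexGo, pvKey]
      rw [if_neg (by simpa [pvMatch] using h), if_neg h, ih (i + 1)]
      cases pvKey rest line
      · simp
      · simp; omega

lemma bStep_eq (best : Option (Nat × String)) (line : String) :
    bStep best line = pvStep pvPriorityPatterns best line := by
  unfold bStep pvStep bPatternIndex
  rw [bPatternIndexGo_eq]
  cases pvKey pvPriorityPatterns line <;> simp

def pvShift (o : Option (Nat × String)) : Option (Nat × String) :=
  o.map (fun b => (b.1 + 1, b.2))

lemma foldl_pvStep_nil (L : List String) (acc : Option (Nat × String)) :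
    L.foldl (pvStep []) acc = acc := by
  induction L generalizing acc with
  | nil => rfl
  | cons l L ih => simpa [pvStep, pvKey] using ih acc

lemma foldl_pvStep_zero (ps : List String) (L : List String) (bl : String) :
    L.foldl (pvStep ps) (some (0, bl)) = some (0, bl) := by
  induction L with
  | nil => rfl
  | cons l L ih =>
    have : pvStep ps (some (0, bl)) l = some (0, bl) := by
      unfold pvStep; cases pvKey ps l <;> simp
    simpa [this] using ih

lemma foldl_pvStep_found (p : String) (ps : List String) (l0 : String) :
    ∀ (L : List String) (acc : Option (Nat × String)),
      (∀ b, acc = some b → 1 ≤ b.1) →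
      L.find? (pvMatch p) = some l0 →
      L.foldl (pvStep (p :: ps)) acc = some (0, l0) := by
  intro L
  induction L with
  | nil => intro acc _ h; simp at h
  | cons l L ih =>
    intro acc hacc hf
    by_cases hm : pvMatch p l
    · have hl0 : l = l0 := by simpa [List.find?, hm] using hf
      subst hl0
      have hstep : pvStep (p :: ps) acc l = some (0, l) := by
        unfold pvStep
        rw [show pvKey (p :: ps) l = some 0 by simp [pvKey, hm]]
        cases acc with
        | none => rfl
        | some b =>
          obtain ⟨j, bl⟩ := b
          have : 1 ≤ j := hacc (j, bl) rfl
          simp [show 0 < j by omega]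
      rw [List.foldl_cons, hstep, foldl_pvStep_zero]
    · have hf' : L.find? (pvMatch p) = some l0 := by simpa [List.find?, hm] using hf
      rw [List.foldl_cons]
      apply ih _ _ hf'
      intro b hb
      obtain ⟨bi, bl'⟩ := b
      unfold pvStep at hb
      rw [show pvKey (p :: ps) l = (pvKey ps l).map (· + 1) by simp [pvKey, hm]] at hb
      cases hk : pvKey ps l with
      | none =>
        rw [hk] at hb; simp only [Option.map_none] at hb
        exact hacc (bi, bl') hb
      | some k =>
        rw [hk] at hb; simp only [Option.map_some] at hb
        cases acc with
        | none => simp at hb; simp; omega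
        | some b' =>
          obtain ⟨j, bl⟩ := b'
          have hj : 1 ≤ j := hacc (j, bl) rfl
          by_cases hlt : k + 1 < j
          · simp [hlt] at hb; simp; omega
          · simp [hlt] at hb; simp; omega

lemma foldl_pvStep_shift (p : String) (ps : List String) :
    ∀ (L : List String) (acc : Option (Nat × String)),
      (∀ l ∈ L, pvMatch p l = false) →
      L.foldl (pvStep (p :: ps)) (pvShift acc) = pvShift (L.foldl (pvStep ps) acc) := by
  intro L
  induction L with
  | nil => intro acc _; rfl
  | cons l L ih =>
    intro acc hm
    have hml : pvMatch p l = false := hm l (by simp)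
    have hstep : pvStep (p :: ps) (pvShift acc) l = pvShift (pvStep ps acc l) := by
      unfold pvStep
      rw [show pvKey (p :: ps) l = (pvKey ps l).map (· + 1) by simp [pvKey, hml]]
      cases hk : pvKey ps l with
      | none => simp
      | some k =>
        cases acc with
        | none => simp [pvShift]
        | some b =>
          obtain ⟨j, bl⟩ := b
          by_cases hlt : k < j
          · simp [pvShift, hlt, show k + 1 < j + 1 by omega]
          · simp [pvShift, hlt, show ¬ (k + 1 < j + 1) by omega]
    rw [List.foldl_cons, List.foldl_cons, hstep, ih (pvStep ps acc l) (fun x hx => hm x (by simp [hx]))]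

lemma aPatternLoop_eq_foldl (ps : List String) (L : List String) :
    aPatternLoop L ps = (L.foldl (pvStep ps) none).map Prod.snd := by
  induction ps with
  | nil => simp [aPatternLoop, foldl_pvStep_nil]
  | cons p rest ih =>
    unfold aPatternLoop
    cases hf : L.find? (fun line => PySem.Str.isIn (PySem.Str.lower p) (PySem.Str.lower line)) with
    | some l0 =>
      have hf' : L.find? (pvMatch p) = some l0 := hf
      rw [foldl_pvStep_found p rest l0 L none (by simp) hf']
      rfl
    | none =>
      have hf' : ∀ l ∈ L, pvMatch p l = false := by
        intro l hl
        have := List.find?_eq_none.mp hf l hl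
        simpa [pvMatch] using this
      show aPatternLoop L rest = _
      calc aPatternLoop L rest = (L.foldl (pvStep rest) none).map Prod.snd := ih
        _ = (pvShift (L.foldl (pvStep rest) none)).map Prod.snd := by
              cases L.foldl (pvStep rest) none <;> rfl
        _ = (L.foldl (pvStep (p :: rest)) (pvShift none)).map Prod.snd := by
              rw [foldl_pvStep_shift p rest L none hf']
        _ = (L.foldl (pvStep (p :: rest)) none).map Prod.snd := rfl

-- both builds of combined_lines coincide
lemma foldl_norm_filter (g : String → String) (raws : List String) (acc : List String) :
    raws.foldl (fun a raw =>
        let line := g raw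
        if line ≠ "" then a ++ [line] else a) acc
      = acc ++ (raws.map g).filter (fun line => line ≠ "") := by
  induction raws generalizing acc with
  | nil => simp
  | cons r rs ih =>
    simp only [List.foldl_cons, List.map_cons, List.filter_cons]
    by_cases h : g r = ""
    · rw [if_neg (by simp [h]), if_neg (by simp [h]), ih]
    · rw [if_pos (by simp [h]), if_pos (by simp [h]), ih]
      simp

lemma combined_eq (stdout_text stderr_text : String) :
    ([stderr_text, stdout_text].foldl (fun acc source_text =>
        (PySem.Str.splitlines source_text).foldl (fun acc2 raw_line =>
          let line := PySem.Str.join " " (PySem.Str.split₀ raw_line)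
          if line ≠ "" then acc2 ++ [line] else acc2) acc) [])
      = ((PySem.Str.splitlines stderr_text ++ PySem.Str.splitlines stdout_text).map
          (fun raw_line => PySem.Str.join " " (PySem.Str.split₀ raw_line))).filter
          (fun line => line ≠ "") := by
  rw [List.foldl_cons, List.foldl_cons, List.foldl_nil,
    foldl_norm_filter (fun raw => PySem.Str.join " " (PySem.Str.split₀ raw)),
    foldl_norm_filter (fun raw => PySem.Str.join " " (PySem.Str.split₀ raw)),
    List.nil_append, List.map_append, List.filter_append]

-- ===== VERDICT (by name: the statement is the Claim_ definition above) =====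
theorem extract_codex_failure_detail_py_spec : Claim_equal_extract_codex_failure_detail_py := by
  intro returncode stdout_text stderr_text _
  unfold Spec_extract_codex_failure_detail_py
  simp only [extract_codex_failure_detail_py, extract_codex_failure_detail_py_alt]
  rw [combined_eq]
  rw [show bStep = pvStep pvPriorityPatterns from
    funext fun b => funext fun l => bStep_eq b l]
  rw [aPatternLoop_eq_foldl]
  cases (((PySem.Str.splitlines stderr_text ++ PySem.Str.splitlines stdout_text).map
      (fun raw_line => PySem.Str.join " " (PySem.Str.split₀ raw_line))).filter
      (fun line => line ≠ "")).foldl (pvStep pvPriorityPatterns) none <;> rfl
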